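-- pv_equiv track=rewrite | github.com/MImahin/DSA-I | 01 Practice Problem 01/pp3.py | finDiff
-- ===== SOURCE A (Python) =====
-- def finDiff(arr):
--     # Insertation sorting technique
--
--     for i in range (1,len(arr)):
--         picked=arr[i]
--         j=i-1
--         while (j>=0) and arr[j]>picked:
--             arr[j+1]=arr[j]
--             j-=1
--         arr[j+1]=picked
--
--     min=arr[1]-arr[0]
--     for i in range(0,len(arr)-1):
--         if arr[i+1]-arr[i] < min :
--             min =arr[i+1]-arr[i]
--     return min
-- ===== SOURCE B (Python) =====
-- def finDiff(arr):
--     # Brute force: the minimum adjacent difference of the sorted array equals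
--     # the minimum absolute difference over all pairs, so no sorting is needed.
--     return min(abs(arr[i] - arr[j])
--                for i in range(len(arr))
--                for j in range(i + 1, len(arr)))
-- ===== Notes on version B (the rewrite author's own statement) =====
-- stated objective: alternative
-- what changed: Replaced the in-place insertion sort followed by an adjacent-difference scan with a sort-free brute-force minimum of |arr[i]-arr[j]| over all index pairs i<j (equal because the min pairwise absolute difference is attained by an adjacent pair of the sorted order); B also no longer mutates the caller's list.
import Mathlib
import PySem

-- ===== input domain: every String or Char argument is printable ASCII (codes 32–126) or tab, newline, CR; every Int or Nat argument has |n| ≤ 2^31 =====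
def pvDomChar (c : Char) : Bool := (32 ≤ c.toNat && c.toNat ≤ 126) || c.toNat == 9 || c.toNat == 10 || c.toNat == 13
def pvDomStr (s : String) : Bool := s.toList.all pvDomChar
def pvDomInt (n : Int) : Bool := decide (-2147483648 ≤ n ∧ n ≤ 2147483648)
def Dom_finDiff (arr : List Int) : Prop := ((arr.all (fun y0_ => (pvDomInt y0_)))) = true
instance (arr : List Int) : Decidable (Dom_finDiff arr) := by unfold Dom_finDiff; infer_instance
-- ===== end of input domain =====

-- B replaces A's in-place insertion sort + adjacent-difference scan by a sort-free
-- brute-force minimum of |arr[i]-arr[j]| over all pairs i<j (equal values, different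
-- algorithm; same O(n^2) cost); A sorts its argument in place — the equivalence proved
-- here is about the return value only (B does not mutate its argument).


-- ===== PORT A =====
-- inner while loop of the insertion sort, with k = j+1 (so the Python state j = k-1):
-- while j>=0 and arr[j]>picked: arr[j+1]=arr[j]; j-=1;  then arr[j+1]=picked.
-- Indices are in range on every admitted input, so getD's default is never used.
def finDiffInner (a : List Int) (k : Nat) (picked : Int) : List Int :=
  match k with
  | 0 => a.set 0 picked
  | k + 1 =>
      if a.getD k 0 > picked then finDiffInner (a.set (k + 1) (a.getD k 0)) k picked
      else a.set (k + 1) picked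

def finDiff (arr : List Int) : Int :=
  -- for i in range(1, len(arr)): picked = arr[i]; ... (in-place insertion sort)
  let a := (List.range' 1 (arr.length - 1)).foldl
    (fun acc i => finDiffInner acc i (acc.getD i 0)) arr
  -- min = arr[1] - arr[0]  (IndexError when len(arr) < 2: excluded by Pre_)
  let m0 := a.getD 1 0 - a.getD 0 0
  -- for i in range(0, len(arr)-1): ...
  (List.range (a.length - 1)).foldl
    (fun m i => if a.getD (i + 1) 0 - a.getD i 0 < m then a.getD (i + 1) 0 - a.getD i 0 else m) m0

-- ===== PORT B =====
-- min(abs(arr[i]-arr[j]) for i in range(len(arr)) for j in range(i+1, len(arr)))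
-- (indices produced by the ranges are always in range, so getD's default is never used)
def finDiff_alt (arr : List Int) : Int :=
  (PySem.List.min?
    ((List.range arr.length).flatMap (fun i =>
      (List.range' (i + 1) (arr.length - (i + 1))).map (fun j =>
        |arr.getD i 0 - arr.getD j 0|)))
    (fun x => x)).getD 0

-- ===== PRECONDITION & SPEC =====
-- A evaluates arr[1] (and B takes min of a nonempty generator) only when len(arr) >= 2;
-- both raise otherwise.
def Pre_finDiff (arr : List Int) : Prop := 2 ≤ arr.length
instance (arr : List Int) : Decidable (Pre_finDiff arr) := by unfold Pre_finDiff; infer_instance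
def pvWitness_finDiff : List Int := ([3, 1, 7] : List Int)

def Spec_finDiff (arr : List Int) (out : Int) : Prop := out = finDiff_alt arr
instance (arr : List Int) (out : Int) : Decidable (Spec_finDiff arr out) := by unfold Spec_finDiff; infer_instance

-- ===== CLAIM (what is proved, stated in full; the proofs are below) =====
def Claim_equal_finDiff : Prop := ∀ (arr : List Int), Dom_finDiff arr → Pre_finDiff arr → Spec_finDiff arr (finDiff arr)

-- ===== LEMMAS AND PROOFS =====

theorem insertBy_append_singleton (before : Int → Int → Bool) (x w : Int) (l : List Int)
    (h : before x w = true) :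
    PySem.List.insertBy before x (l ++ [w]) = PySem.List.insertBy before x l ++ [w] := by
  induction l with
  | nil => simp [PySem.List.insertBy, h]
  | cons y ys ih =>
      simp only [List.cons_append, PySem.List.insertBy]
      by_cases hy : before x y
      · simp [hy]
      · simp [hy, ih]

theorem finDiffInner_spec (pre : List Int) (r : Int) (rs : List Int) (picked : Int)
    (hs : pre.Pairwise (· ≤ ·)) :
    finDiffInner (pre ++ r :: rs) pre.length picked =
      PySem.List.insertBy (fun a b => decide (a < b)) picked pre ++ rs := by
  induction pre using List.reverseRecOn generalizing r rs with
  | nil => simp [finDiffInner, PySem.List.insertBy]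
  | append_singleton l w ih =>
      have hget : ((l ++ [w]) ++ r :: rs).getD l.length 0 = w := by
        simp [List.getD_eq_getElem?_getD]
      have hlen : (l ++ [w]).length = l.length + 1 := by simp
      rw [hlen]
      simp only [finDiffInner, hget]
      by_cases hw : w > picked
      · have hset : ((l ++ [w]) ++ r :: rs).set (l.length + 1) w = l ++ w :: w :: rs := by
          simp
        rw [if_pos hw, hset]
        have := ih w (w :: rs) (hs.sublist (by simp))
        rw [show (l ++ w :: w :: rs) = l ++ w :: (w :: rs) by simp] at this
        rw [this, insertBy_append_singleton _ _ _ _ (by simp [hw]), List.append_assoc]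
        simp
      · have hset : ((l ++ [w]) ++ r :: rs).set (l.length + 1) picked = l ++ w :: picked :: rs := by
          simp
        rw [if_neg hw, hset]
        have hall : ∀ y ∈ l ++ [w], (decide (picked < y)) = false := by
          intro y hy
          rcases List.mem_append.mp hy with h1 | h1
          · have hyw : y ≤ w := by
              rw [List.pairwise_append] at hs
              exact hs.2.2 y h1 w (by simp)
            simp; omega
          · simp at h1; subst h1; simp; omega
        rw [PySem.List.insertBy_of_forall_not_before _ _ _ hall]
        simp

theorem insertBy_sorted (l : List Int) (x : Int) :
    PySem.List.insertBy (fun a b => decide (a < b)) x (PySem.List.sorted l (fun y => y) false) =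
      PySem.List.sorted (l ++ [x]) (fun y => y) false := by
  rw [PySem.List.sorted_eq_foldl_insertBy, PySem.List.sorted_eq_foldl_insertBy, List.foldl_append]
  simp

theorem sortLoop_inv (arr : List Int) (m : Nat) (hm : m ≤ arr.length - 1) :
    (List.range' 1 m).foldl (fun acc i => finDiffInner acc i (acc.getD i 0)) arr =
      PySem.List.sorted (arr.take (m + 1)) (fun x => x) false ++ arr.drop (m + 1) := by
  induction m with
  | zero =>
      simp only [List.range'_zero, List.foldl_nil]
      cases arr with
      | nil => simp [PySem.List.sorted_eq_nil_iff]
      | cons a t =>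
          rw [PySem.List.sorted_eq_self_of_pairwise]
          · simp
          · simp
  | succ m ih =>
      have hm' : m ≤ arr.length - 1 := by omega
      have hlt : m + 1 < arr.length := by omega
      rw [List.range'_concat, List.foldl_append, ih hm']
      simp only [List.foldl_cons, List.foldl_nil]
      rw [show (1 + 1 * m) = m + 1 by omega]
      have hlenS : (PySem.List.sorted (arr.take (m + 1)) (fun x => x) false).length = m + 1 := by
        rw [PySem.List.length_sorted]; simp; omega
      have hdrop : arr.drop (m + 1) = arr[m + 1] :: arr.drop (m + 2) := by
        rw [List.drop_eq_getElem_cons hlt]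
      have hget : (PySem.List.sorted (arr.take (m + 1)) (fun x => x) false ++ arr.drop (m + 1)).getD (m + 1) 0 = arr[m + 1] := by
        rw [List.getD_eq_getElem?_getD, List.getElem?_append_right (by omega), hlenS,
          Nat.sub_self, hdrop]
        simp [List.getElem?_eq_getElem hlt]
      have hspec := finDiffInner_spec (PySem.List.sorted (arr.take (m + 1)) (fun x => x) false)
        arr[m + 1] (arr.drop (m + 2)) arr[m + 1] (PySem.List.sorted_pairwise _ _)
      rw [hlenS] at hspec
      rw [hget, hdrop, hspec, insertBy_sorted]
      congr 2
      conv_rhs => rw [List.take_add_one]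
      rw [List.getElem?_eq_getElem hlt]
      simp

theorem sortLoop_eq_sorted (arr : List Int) (h : 1 ≤ arr.length) :
    (List.range' 1 (arr.length - 1)).foldl (fun acc i => finDiffInner acc i (acc.getD i 0)) arr =
      PySem.List.sorted arr (fun x => x) false := by
  have := sortLoop_inv arr (arr.length - 1) (le_refl _)
  rw [show arr.length - 1 + 1 = arr.length by omega] at this
  simpa using this

theorem foldl_range_getD (l : List Int) (g : Int → Int → Int) (x : Int) :
    (List.range l.length).foldl (fun m i => g m (l.getD i 0)) x = l.foldl g x := by
  induction l generalizing x with
  | nil => simp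
  | cons a t ih =>
      simp only [List.length_cons, List.range_succ_eq_map, List.foldl_cons, List.foldl_map]
      simpa [List.getD] using ih (g x a)

theorem diff_getD (s : List Int) (i : Nat) (h : i + 1 < s.length) :
    ((s.zip (s.drop 1)).map (fun p => p.2 - p.1)).getD i 0 =
      s.getD (i + 1) 0 - s.getD i 0 := by
  have hm : i < ((s.zip (s.drop 1)).map (fun p => p.2 - p.1)).length := by simp; omega
  rw [List.getD_eq_getElem?_getD, List.getElem?_eq_getElem hm,
    List.getD_eq_getElem?_getD, List.getElem?_eq_getElem h,
    List.getD_eq_getElem?_getD, List.getElem?_eq_getElem (by omega : i < s.length)]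
  simp [List.getElem_zip]

theorem diff_length (s : List Int) :
    ((s.zip (s.drop 1)).map (fun p => p.2 - p.1)).length = s.length - 1 := by
  simp

-- A's second loop is the running minimum of the adjacent differences of s
theorem phase2 (s : List Int) (hlen : 2 ≤ s.length) :
    (List.range (s.length - 1)).foldl
      (fun m i => if s.getD (i + 1) 0 - s.getD i 0 < m then s.getD (i + 1) 0 - s.getD i 0 else m)
      (s.getD 1 0 - s.getD 0 0)
    = ((s.zip (s.drop 1)).map (fun p => p.2 - p.1)).foldl min (s.getD 1 0 - s.getD 0 0) := by
  have hDlen := diff_length s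
  have step1 : (List.range (s.length - 1)).foldl
      (fun m i => if s.getD (i + 1) 0 - s.getD i 0 < m then s.getD (i + 1) 0 - s.getD i 0 else m)
      (s.getD 1 0 - s.getD 0 0)
      = ((s.zip (s.drop 1)).map (fun p => p.2 - p.1)).foldl
          (fun m d => if d < m then d else m) (s.getD 1 0 - s.getD 0 0) := by
    rw [← hDlen]
    rw [PySem.List.foldl_congr_mem _ _
      (fun m i => if ((s.zip (s.drop 1)).map (fun p => p.2 - p.1)).getD i 0 < m
                  then ((s.zip (s.drop 1)).map (fun p => p.2 - p.1)).getD i 0 else m) _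
      (by intro acc i hi
          have hi' := List.mem_range.mp hi
          rw [hDlen] at hi'
          beta_reduce
          rw [← diff_getD s i (by omega)])]
    exact foldl_range_getD _ (fun m d => if d < m then d else m) _
  rw [step1]
  exact PySem.List.foldl_congr_mem _ _ _ _
    (by intro m d _; by_cases h : d < m <;> simp [h] <;> omega)

theorem foldl_min_mem (l : List Int) (x : Int) :
    l.foldl min x = x ∨ l.foldl min x ∈ l := by
  induction l generalizing x with
  | nil => simp
  | cons a t ih =>
      rcases ih (min x a) with h | h
      · by_cases hxa : x ≤ a
        · left; simp only [List.foldl_cons]; rw [h]; omega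
        · right; simp only [List.foldl_cons]; rw [h]
          have hmin : min x a = a := by omega
          rw [hmin]; exact List.mem_cons_self ..
      · right; simp only [List.foldl_cons]; right; exact h

theorem foldl_min_le (l : List Int) (x : Int) :
    l.foldl min x ≤ x ∧ ∀ y ∈ l, l.foldl min x ≤ y := by
  induction l generalizing x with
  | nil => simp
  | cons a t ih =>
      obtain ⟨h1, h2⟩ := ih (min x a)
      refine ⟨by simp only [List.foldl_cons]; omega, ?_⟩
      intro y hy
      rcases List.mem_cons.mp hy with h | h
      · subst h; simp only [List.foldl_cons]; omega
      · exact h2 y h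

-- two distinct positions with the same value give count ≥ 2
theorem count_two (l : List Int) (v : Int) (i j : Nat) (hij : i < j) (hj : j < l.length)
    (hi : l.getD i 0 = v) (hjv : l.getD j 0 = v) : 2 ≤ l.count v := by
  induction l generalizing i j with
  | nil => simp at hj
  | cons a t ih =>
      rcases Nat.eq_zero_or_pos i with h0 | h0
      · subst h0
        simp only [List.getD_cons_zero] at hi
        obtain ⟨j', rfl⟩ : ∃ j', j = j' + 1 := ⟨j - 1, by omega⟩
        simp only [List.getD_cons_succ] at hjv
        have hmem : v ∈ t := by
          have : t.getD j' 0 = v := hjv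
          rw [List.getD_eq_getElem?_getD, List.getElem?_eq_getElem (by simpa using hj)] at this
          simp only [Option.getD_some] at this
          exact this ▸ List.getElem_mem _
        have := List.count_pos_iff.mpr hmem
        simp [hi]
        omega
      · obtain ⟨i', rfl⟩ : ∃ i', i = i' + 1 := ⟨i - 1, by omega⟩
        obtain ⟨j', rfl⟩ : ∃ j', j = j' + 1 := ⟨j - 1, by omega⟩
        simp only [List.getD_cons_succ] at hi hjv
        have := ih i' j' (by omega) (by simpa using hj) hi hjv
        simp [List.count_cons]
        omega

-- count ≥ 2 gives two distinct positions with that value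
theorem two_pos_of_count (s : List Int) (v : Int) (h : 2 ≤ s.count v) :
    ∃ p q, p < q ∧ q < s.length ∧ s.getD p 0 = v ∧ s.getD q 0 = v := by
  induction s with
  | nil => simp at h
  | cons a t ih =>
      by_cases ha : a = v
      · have hmem : v ∈ t := by
          rw [List.count_cons, if_pos (by simp [ha])] at h
          exact List.count_pos_iff.mp (by omega)
        obtain ⟨q', hq', hval⟩ := List.mem_iff_getElem.mp hmem
        exact ⟨0, q' + 1, by omega, by simpa using hq',
          by simpa using ha, by simp [List.getD_eq_getElem?_getD, List.getElem?_eq_getElem hq', hval]⟩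
      · rw [List.count_cons, if_neg (by simp [ha])] at h
        obtain ⟨p, q, hpq, hq, h1, h2⟩ := ih (by omega)
        exact ⟨p + 1, q + 1, by omega, by simpa using hq, by simpa using h1, by simpa using h2⟩

theorem pos_of_mem (s : List Int) (v : Int) (h : v ∈ s) :
    ∃ p, p < s.length ∧ s.getD p 0 = v := by
  obtain ⟨p, hp, hval⟩ := List.mem_iff_getElem.mp h
  exact ⟨p, hp, by simp [List.getD_eq_getElem?_getD, List.getElem?_eq_getElem hp, hval]⟩

-- transfer two distinct positions of l to two distinct positions of s across a permutation
theorem two_positions (l s : List Int) (h : s.Perm l) (i j : Nat)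
    (hi : i < l.length) (hj : j < l.length) (hij : i ≠ j) :
    ∃ p q, p ≠ q ∧ p < s.length ∧ q < s.length ∧
      s.getD p 0 = l.getD i 0 ∧ s.getD q 0 = l.getD j 0 := by
  by_cases hv : l.getD i 0 = l.getD j 0
  · have hcount : 2 ≤ l.count (l.getD i 0) := by
      rcases Nat.lt_or_ge i j with hlt | hge
      · exact count_two l _ i j hlt hj rfl hv.symm
      · exact count_two l _ j i (by omega) hi hv.symm rfl
    have hcount' : 2 ≤ s.count (l.getD i 0) := by rw [h.count_eq]; exact hcount
    obtain ⟨p, q, hpq, hq, h1, h2⟩ := two_pos_of_count s _ hcount'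
    exact ⟨p, q, by omega, by omega, hq, h1, hv ▸ h2⟩
  · have hmi : l.getD i 0 ∈ s := h.mem_iff.mpr (by
      rw [List.getD_eq_getElem?_getD, List.getElem?_eq_getElem hi]
      exact List.getElem_mem _)
    have hmj : l.getD j 0 ∈ s := h.mem_iff.mpr (by
      rw [List.getD_eq_getElem?_getD, List.getElem?_eq_getElem hj]
      exact List.getElem_mem _)
    obtain ⟨p, hp, h1⟩ := pos_of_mem s _ hmi
    obtain ⟨q, hq, h2⟩ := pos_of_mem s _ hmj
    exact ⟨p, q, fun hpq => hv (by rw [← h1, ← h2, hpq]), hp, hq, h1, h2⟩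

-- membership characterisation of B's pairwise-difference list
theorem mem_pairDiffs (arr : List Int) (d : Int) :
    d ∈ (List.range arr.length).flatMap (fun i =>
      (List.range' (i + 1) (arr.length - (i + 1))).map (fun j =>
        |arr.getD i 0 - arr.getD j 0|)) ↔
    ∃ i j, i < j ∧ j < arr.length ∧ d = |arr.getD i 0 - arr.getD j 0| := by
  simp only [List.mem_flatMap, List.mem_map, List.mem_range, List.mem_range'_1]
  constructor
  · rintro ⟨i, hi, j, ⟨hj1, hj2⟩, rfl⟩
    exact ⟨i, j, by omega, by omega, rfl⟩
  · rintro ⟨i, j, hij, hj, rfl⟩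
    exact ⟨i, by omega, j, ⟨by omega, by omega⟩, rfl⟩

-- membership characterisation of the adjacent-difference list
theorem mem_adjDiffs (s : List Int) (d : Int) :
    d ∈ (s.zip (s.drop 1)).map (fun p => p.2 - p.1) ↔
    ∃ p, p + 1 < s.length ∧ d = s.getD (p + 1) 0 - s.getD p 0 := by
  constructor
  · intro h
    obtain ⟨p, hp, hval⟩ := List.mem_iff_getElem.mp h
    have hlen : p + 1 < s.length := by
      have := diff_length s
      omega
    refine ⟨p, hlen, ?_⟩
    have := diff_getD s p hlen
    rw [List.getD_eq_getElem?_getD, List.getElem?_eq_getElem hp] at this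
    simp only [Option.getD_some] at this
    omega
  · rintro ⟨p, hp, rfl⟩
    have hlen : p < ((s.zip (s.drop 1)).map (fun q => q.2 - q.1)).length := by
      rw [diff_length]; omega
    rw [← diff_getD s p hp, List.getD_eq_getElem?_getD, List.getElem?_eq_getElem hlen]
    exact List.getElem_mem _

theorem sorted_getD_mono (arr : List Int) (p q : Nat) (hpq : p ≤ q)
    (hq : q < (PySem.List.sorted arr (fun x => x) false).length) :
    (PySem.List.sorted arr (fun x => x) false).getD p 0 ≤
      (PySem.List.sorted arr (fun x => x) false).getD q 0 := by
  have := PySem.List.sorted_id_getElem_mono (xs := arr) (p := p) (q := q) hpq hq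
  simp only [List.getD_eq_getElem?_getD]
  rw [List.getElem?_eq_getElem hq, List.getElem?_eq_getElem (by omega : p < _)]
  simpa using this

-- A's running minimum is a lower bound for every (not necessarily adjacent) sorted gap
theorem lb_gap (s : List Int) (m : Int)
    (hlb : ∀ d ∈ (s.zip (s.drop 1)).map (fun p => p.2 - p.1), m ≤ d)
    (hmono : ∀ p q, p ≤ q → q < s.length → s.getD p 0 ≤ s.getD q 0)
    (p q : Nat) (hpq : p < q) (hq : q < s.length) :
    m ≤ s.getD q 0 - s.getD p 0 := by
  have h1 : m ≤ s.getD (p + 1) 0 - s.getD p 0 :=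
    hlb _ ((mem_adjDiffs s _).mpr ⟨p, by omega, rfl⟩)
  have h2 : s.getD (p + 1) 0 ≤ s.getD q 0 := hmono (p + 1) q (by omega) hq
  omega

-- ===== VERDICT (by name: the statement is the Claim_ definition above) =====
theorem finDiff_spec : Claim_equal_finDiff := by
  intro arr _ hpre
  unfold Pre_finDiff at hpre
  unfold Spec_finDiff finDiff finDiff_alt
  rw [sortLoop_eq_sorted arr (by omega)]
  set s := PySem.List.sorted arr (fun x => x) false with hs_def
  have hslen : s.length = arr.length := PySem.List.length_sorted ..
  have hperm : s.Perm arr := PySem.List.sorted_perm ..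
  have hmono : ∀ p q, p ≤ q → q < s.length → s.getD p 0 ≤ s.getD q 0 :=
    fun p q h1 h2 => sorted_getD_mono arr p q h1 (by rw [← hs_def]; exact h2)
  rw [phase2 s (by omega)]
  set D := (s.zip (s.drop 1)).map (fun p => p.2 - p.1) with hD_def
  set x0 := s.getD 1 0 - s.getD 0 0 with hx0_def
  set mA := D.foldl min x0 with hmA_def
  -- mA is a member of D and a lower bound of D
  have hx0D : x0 ∈ D := (mem_adjDiffs s _).mpr ⟨0, by omega, rfl⟩
  have hAmem : mA ∈ D := by
    rcases foldl_min_mem D x0 with h | h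
    · rw [hmA_def, h]; exact hx0D
    · exact h
  have hAlb : ∀ d ∈ D, mA ≤ d := (foldl_min_le D x0).2
  -- B's value
  set P := (List.range arr.length).flatMap (fun i =>
      (List.range' (i + 1) (arr.length - (i + 1))).map (fun j =>
        |arr.getD i 0 - arr.getD j 0|)) with hP_def
  have hPne : P ≠ [] := by
    intro hnil
    have : |arr.getD 0 0 - arr.getD 1 0| ∈ P :=
      (mem_pairDiffs arr _).mpr ⟨0, 1, by omega, by omega, rfl⟩
    rw [hnil] at this; simp at this
  obtain ⟨mB, hmB⟩ : ∃ mB, PySem.List.min? P (fun x => x) = some mB := by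
    rcases h : PySem.List.min? P (fun x => x) with _ | mB
    · exact absurd ((PySem.List.min?_eq_none_iff P (fun x => x)).mp h) hPne
    · exact ⟨mB, rfl⟩
  have hBmem : mB ∈ P := PySem.List.min?_mem hmB
  have hBlb : ∀ y ∈ P, mB ≤ y := fun y hy => PySem.List.min?_isMin hmB y hy
  rw [hmB]
  simp only [Option.getD_some]
  -- mA ≤ mB : every pairwise |difference| is a sorted gap
  have h1 : mA ≤ mB := by
    obtain ⟨i, j, hij, hj, rfl⟩ := (mem_pairDiffs arr mB).mp hBmem
    obtain ⟨p, q, hpq, hp, hq, hvp, hvq⟩ :=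
      two_positions arr s hperm i j (by omega) hj (by omega)
    rcases Nat.lt_or_ge p q with hlt | hge
    · have hle : s.getD p 0 ≤ s.getD q 0 := hmono p q (by omega) hq
      have := lb_gap s mA hAlb hmono p q hlt hq
      rw [← hvp, ← hvq]
      rw [abs_sub_comm, abs_of_nonneg (by omega)]
      omega
    · have hlt : q < p := by omega
      have hle : s.getD q 0 ≤ s.getD p 0 := hmono q p (by omega) hp
      have := lb_gap s mA hAlb hmono q p hlt hp
      rw [← hvp, ← hvq]
      rw [abs_of_nonneg (by omega)]
      omega
  -- mB ≤ mA : the minimal adjacent sorted gap is one of the pairwise |differences|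
  have h2 : mB ≤ mA := by
    obtain ⟨p, hp, hval⟩ := (mem_adjDiffs s mA).mp hAmem
    obtain ⟨i, j, hij, hi, hj, hvi, hvj⟩ :=
      two_positions s arr hperm.symm p (p + 1) (by omega) (by omega) (by omega)
    have hle : s.getD p 0 ≤ s.getD (p + 1) 0 := hmono p (p + 1) (by omega) hp
    rcases Nat.lt_or_ge i j with hlt | hge
    · have hmem : |arr.getD i 0 - arr.getD j 0| ∈ P :=
        (mem_pairDiffs arr _).mpr ⟨i, j, hlt, hj, rfl⟩
      have := hBlb _ hmem
      rw [hvi, hvj, abs_of_nonpos (by omega)] at this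
      omega
    · have hlt : j < i := by omega
      have hmem : |arr.getD j 0 - arr.getD i 0| ∈ P :=
        (mem_pairDiffs arr _).mpr ⟨j, i, hlt, hi, rfl⟩
      have := hBlb _ hmem
      rw [hvi, hvj, abs_of_nonneg (by omega)] at this
      omega
  omega
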